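-- pv_equiv track=rewrite | github.com/liskos/shlyk | variant_05/22 задание.py | func
-- ===== SOURCE A (Python) =====
-- def func(x):
--     a = 0;
--     b = 1
--     while x > 0:
--         if x % 2 > 0:
--             a += x % 8
--         else:
--             b *= x % 8
--         x = x // 8
--     return a,b
-- ===== SOURCE B (Python) =====
-- def func(x):
--     # B: guard non-positive x, then build the octal digit list once and
--     # aggregate it with two filtered passes (sum of odd digits, product of even digits).
--     if x <= 0:
--         return (0, 1)
--     digits = [int(c) for c in oct(x)[2:]]
--     a = sum(d for d in digits if d % 2)
--     evens = [d for d in digits if d % 2 == 0]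
--     b = 1
--     for d in evens:
--         b *= d
--     return a, b
-- ===== Notes on version B (the rewrite author's own statement) =====
-- stated objective: simpler
-- what changed: Replaces A's single interleaved mod/div accumulation loop with a build-the-octal-digit-list-once (via oct()) then two filtered aggregations (sum of odd digits, product of even digits) decomposition.
import Mathlib
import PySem

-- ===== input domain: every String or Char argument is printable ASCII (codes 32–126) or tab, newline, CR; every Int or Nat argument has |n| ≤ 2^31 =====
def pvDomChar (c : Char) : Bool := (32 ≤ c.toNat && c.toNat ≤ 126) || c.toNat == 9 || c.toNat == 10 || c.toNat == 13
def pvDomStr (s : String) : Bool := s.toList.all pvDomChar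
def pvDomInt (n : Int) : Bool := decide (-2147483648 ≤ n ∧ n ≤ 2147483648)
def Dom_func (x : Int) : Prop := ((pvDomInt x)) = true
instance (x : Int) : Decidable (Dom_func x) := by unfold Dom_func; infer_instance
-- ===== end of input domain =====

-- B changes the decomposition (digit list + two filtered aggregations instead of A's interleaved loop); objective: simpler.

-- ===== PORT A =====
-- the while loop of A, state (a, b, x)
def funcLoop (a b x : Int) : Int × Int :=
  if h : x > 0 then
    if PySem.Int.mod x 2 > 0 then
      funcLoop (a + PySem.Int.mod x 8) b (PySem.Int.floordiv x 8)
    else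
      funcLoop a (b * PySem.Int.mod x 8) (PySem.Int.floordiv x 8)
  else (a, b)
termination_by x.toNat
decreasing_by
  all_goals
    rw [PySem.Int.floordiv_eq_ediv_of_pos (by norm_num : (0:Int) < 8)]
    omega

def func (x : Int) : Int × Int := funcLoop 0 1 x

-- ===== PORT B =====
-- port of [int(c) for c in oct(x)[2:]] for x > 0: exact, since oct's characters after
-- the '0o' prefix are precisely x's base-8 digits, most significant first
def octDigits (x : Int) : List Int :=
  if h : x < 8 then [x]
  else octDigits (PySem.Int.floordiv x 8) ++ [PySem.Int.mod x 8]
termination_by x.toNat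
decreasing_by
  rw [PySem.Int.floordiv_eq_ediv_of_pos (by norm_num : (0:Int) < 8)]
  omega

def func_alt (x : Int) : Int × Int :=
  if x ≤ 0 then (0, 1)
  else
    (((octDigits x).filter (fun d => decide (PySem.Int.mod d 2 > 0))).sum,
     ((octDigits x).filter (fun d => decide (PySem.Int.mod d 2 = 0))).foldl (· * ·) 1)

-- ===== PRECONDITION & SPEC =====
def Spec_func (x : Int) (out : Int × Int) : Prop := out = func_alt x
instance (x : Int) (out : Int × Int) : Decidable (Spec_func x out) := by unfold Spec_func; infer_instance

-- ===== CLAIM (what is proved, stated in full; the proofs are below) =====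
def Claim_equal_func : Prop := ∀ (x : Int), Dom_func x → Spec_func x (func x)

-- ===== LEMMAS AND PROOFS =====

-- abbreviations for B's two aggregations
def sOdd (x : Int) : Int := ((octDigits x).filter (fun d => decide (PySem.Int.mod d 2 > 0))).sum
def pEven (x : Int) : Int := ((octDigits x).filter (fun d => decide (PySem.Int.mod d 2 = 0))).foldl (· * ·) 1

lemma mod_pos (a b : Int) (hb : 0 < b) : PySem.Int.mod a b = a % b :=
  PySem.Int.mod_eq_emod_of_pos hb

lemma fdiv_pos (a b : Int) (hb : 0 < b) : PySem.Int.floordiv a b = a / b :=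
  PySem.Int.floordiv_eq_ediv_of_pos hb

lemma loop_eq (n : Nat) : ∀ (x : Int), x.toNat ≤ n → 0 < x → ∀ a b : Int,
    funcLoop a b x = (a + sOdd x, b * pEven x) := by
  induction n with
  | zero => intro x hx hpos; omega
  | succ n ih =>
    intro x hx hpos a b
    rw [funcLoop]
    simp only [hpos, dif_pos]
    by_cases hsmall : x < 8
    · -- single digit: octDigits x = [x], x % 8 = x, loop recurses to x / 8 = 0
      have hd : octDigits x = [x] := by rw [octDigits]; simp [hsmall]
      have hm8 : PySem.Int.mod x 8 = x := by rw [mod_pos _ _ (by norm_num)]; omega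
      have hq : PySem.Int.floordiv x 8 = 0 := by rw [fdiv_pos _ _ (by norm_num)]; omega
      have hm2 : PySem.Int.mod x 2 = x % 2 := mod_pos _ _ (by norm_num)
      by_cases hodd : x % 2 > 0
      · have hnz : ¬ x % 2 = 0 := by omega
        have hnd : ¬ (2:Int) ∣ x := by omega
        rw [if_pos (by rw [hm2]; exact hodd)]
        rw [hm8, hq, funcLoop]
        simp [sOdd, pEven, hd, hodd, hnd]
      · have hz : x % 2 = 0 := by omega
        have hdd : (2:Int) ∣ x := by omega
        rw [if_neg (by rw [hm2]; exact hodd)]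
        rw [hm8, hq, funcLoop]
        simp [sOdd, pEven, hd, hz, hdd]
    · -- x ≥ 8: octDigits x = octDigits (x/8) ++ [x % 8]
      have hd : octDigits x = octDigits (PySem.Int.floordiv x 8) ++ [PySem.Int.mod x 8] := by
        rw [octDigits]; simp [hsmall]
      have hm8 : PySem.Int.mod x 8 = x % 8 := mod_pos _ _ (by norm_num)
      have hq : PySem.Int.floordiv x 8 = x / 8 := fdiv_pos _ _ (by norm_num)
      have hm2 : PySem.Int.mod x 2 = x % 2 := mod_pos _ _ (by norm_num)
      have hqpos : 0 < x / 8 := by omega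
      have hqle : (x / 8).toNat ≤ n := by omega
      -- parity of the digit x % 8 equals parity of x
      have hpar : (x % 8) % 2 = x % 2 := Int.emod_emod_of_dvd x (by norm_num)
      have hdig2 : PySem.Int.mod (PySem.Int.mod x 8) 2 = x % 2 := by
        rw [hm8, mod_pos _ _ (by norm_num), hpar]
      by_cases hodd : x % 2 > 0
      · rw [if_pos (by rw [hm2]; exact hodd)]
        rw [ih (PySem.Int.floordiv x 8) (by rw [hq]; exact hqle) (by rw [hq]; exact hqpos)]
        have hS : sOdd x = sOdd (PySem.Int.floordiv x 8) + x % 8 := by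
          simp [sOdd, hd, List.filter_append, hdig2, hodd, hm8]
        have hnz : ¬ x % 2 = 0 := by omega
        have hnd : ¬ (2:Int) ∣ x := by omega
        have hn2d : ¬ (2:Int) ∣ x % 8 := by omega
        have hP : pEven x = pEven (PySem.Int.floordiv x 8) := by
          simp [pEven, hd, List.filter_append, hdig2, hnz, hnd, hn2d]
        rw [hS, hP, hm8, Prod.mk.injEq]
        constructor <;> ring
      · rw [if_neg (by rw [hm2]; exact hodd)]
        rw [ih (PySem.Int.floordiv x 8) (by rw [hq]; exact hqle) (by rw [hq]; exact hqpos)]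
        have hS : sOdd x = sOdd (PySem.Int.floordiv x 8) := by
          simp [sOdd, hd, List.filter_append, hdig2, hodd]
        have hz : x % 2 = 0 := by omega
        have hdd : (2:Int) ∣ x := by omega
        have hP : pEven x = pEven (PySem.Int.floordiv x 8) * (x % 8) := by
          have h2d : (2:Int) ∣ x % 8 := by omega
          simp [pEven, hd, List.filter_append, hdig2, hz, hdd, h2d, hm8]
        rw [hS, hP, hm8, Prod.mk.injEq]
        constructor <;> ring

-- ===== VERDICT (by name: the statement is the Claim_ definition above) =====
theorem func_spec : Claim_equal_func := by
  intro x _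
  unfold Spec_func func func_alt
  by_cases hpos : x ≤ 0
  · have hng : ¬ x > 0 := by omega
    rw [funcLoop]; simp [hng, hpos]
  · rw [loop_eq x.toNat x le_rfl (by omega)]
    simp [hpos, sOdd, pEven]
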